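-- pv_equiv track=rewrite | github.com/Dslpss/dbdouble | services/verabet_patterns.py | count_streak
-- ===== SOURCE A (Python) =====
-- from typing import List, Optional, Dict, Tuple
--
-- def count_streak(historico: List[str], color: str) -> int:
--     """Conta sequência consecutiva de uma cor no final do histórico"""
--     streak = 0
--     for i in range(len(historico) - 1, -1, -1):
--         if historico[i] == color:
--             streak += 1
--         else:
--             break
--     return streak
-- ===== SOURCE B (Python) =====
-- def count_streak(historico, color):
--     """Conta sequência consecutiva de uma cor no final do histórico"""
--     streak = 0
--     for item in historico:
--         if item == color:
--             streak += 1
--         else: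
--             streak = 0
--     return streak
-- ===== Notes on version B (the rewrite author's own statement) =====
-- stated objective: alternative
-- what changed: Replaces the backward early-break loop with a single forward pass that keeps a running counter, resetting it to 0 on any mismatch; the counter's final value is the trailing streak length.
import Mathlib
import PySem

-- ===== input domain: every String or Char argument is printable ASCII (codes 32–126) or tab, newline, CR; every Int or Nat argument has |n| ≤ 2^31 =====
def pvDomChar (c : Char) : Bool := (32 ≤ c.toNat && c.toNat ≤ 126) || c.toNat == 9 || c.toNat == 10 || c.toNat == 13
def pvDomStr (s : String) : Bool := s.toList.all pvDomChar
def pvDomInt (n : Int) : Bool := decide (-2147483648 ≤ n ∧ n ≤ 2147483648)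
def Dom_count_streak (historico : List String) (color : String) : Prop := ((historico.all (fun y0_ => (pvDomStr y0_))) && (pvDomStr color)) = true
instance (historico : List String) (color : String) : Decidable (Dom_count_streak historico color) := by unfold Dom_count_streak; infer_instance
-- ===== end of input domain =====

-- B is an alternative single forward pass with a reset-on-mismatch counter instead of A's backward early-break loop; same cost, return values proved equal.

-- ===== PORT A =====
-- A iterates i = len-1 … 0, incrementing streak while historico[i] == color and
-- breaking at the first mismatch: i.e. it counts the matching prefix of the
-- reversed list, stopping (break) at the first mismatch.
def count_streak_back : List String → String → Int
  | [], _ => 0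
  | x :: rest, color => if x == color then 1 + count_streak_back rest color else 0

def count_streak (historico : List String) (color : String) : Int :=
  count_streak_back historico.reverse color

-- ===== PORT B =====
def count_streak_alt (historico : List String) (color : String) : Int :=
  historico.foldl (fun streak item => if item == color then streak + 1 else 0) 0

-- ===== PRECONDITION & SPEC =====
def Spec_count_streak (historico : List String) (color : String) (out : Int) : Prop := out = count_streak_alt historico color
instance (historico : List String) (color : String) (out : Int) : Decidable (Spec_count_streak historico color out) := by unfold Spec_count_streak; infer_instance

-- ===== CLAIM (what is proved, stated in full; the proofs are below) =====
def Claim_equal_count_streak : Prop := ∀ (historico : List String) (color : String), Dom_count_streak historico color → Spec_count_streak historico color (count_streak historico color)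

-- ===== LEMMAS AND PROOFS =====
theorem count_streak_eq_alt (historico : List String) (color : String) :
    count_streak historico color = count_streak_alt historico color := by
  unfold count_streak count_streak_alt
  induction historico using List.reverseRecOn with
  | nil => simp [count_streak_back]
  | append_singleton l x ih =>
      simp only [List.reverse_append, List.reverse_cons, List.reverse_nil, List.nil_append,
        List.cons_append, List.foldl_append, List.foldl_cons, List.foldl_nil,
        count_streak_back] at *
      by_cases h : x == color <;> simp [h, ih] <;> omega

-- ===== VERDICT (by name: the statement is the Claim_ definition above) =====
theorem count_streak_spec : Claim_equal_count_streak := by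
  intro historico color _
  exact count_streak_eq_alt historico color
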